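-- pv_equiv track=rewrite | github.com/Codernob/problem-solving-codes | code/uva/401.py | ismir
-- ===== SOURCE A (Python) =====
-- def rev(c):
--     if c=='A':
--         return 'A'
--     elif c=='E':
--         return '3'
--     elif c=='H':
--         return 'H'
--     elif c=='I':
--         return 'I'
--     elif c=='J':
--         return 'L'
--     elif c=='L':
--         return 'J'
--     elif c=='M':
--         return 'M'
--     elif c=='O':
--         return 'O'
--     elif c=='S':
--         return '2'
--     elif c=='T':
--         return 'T'
--     elif c=='U':
--         return 'U'
--     elif c=='V':
--         return 'V'
--     elif c=='W':
--         return 'W'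
--     elif c=='X':
--         return 'X'
--     elif c=='Y':
--         return 'Y'
--     elif c=='Z':
--         return '5'
--     elif c=='1':
--         return '1'
--     elif c=='2':
--         return 'S'
--     elif c=='3':
--         return 'E'
--     elif c=='5':
--         return 'Z'
--     elif c=='8':
--         return '8'
--     else:
--         return 'invalid'
--
-- def ismir(string):
--     temp=''
--     for i in range(len(string)):
--         temp = temp + rev(string[i])
--     if temp==string[::-1]:
--         return True
--     else:
--         return False
-- ===== SOURCE B (Python) =====
-- _MIRROR = {'A': 'A', 'E': '3', 'H': 'H', 'I': 'I', 'J': 'L', 'L': 'J',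
--            'M': 'M', 'O': 'O', 'S': '2', 'T': 'T', 'U': 'U', 'V': 'V',
--            'W': 'W', 'X': 'X', 'Y': 'Y', 'Z': '5', '1': '1', '2': 'S',
--            '3': 'E', '5': 'Z', '8': '8'}
--
--
-- def ismir(string):
--     cs = list(string)
--     while cs:
--         if _MIRROR.get(cs[0]) != cs[-1]:
--             return False
--         cs = cs[1:-1]
--     return True
-- ===== Notes on version B (the rewrite author's own statement) =====
-- stated objective: faster
-- what changed: B replaces the 22-branch if-chain helper by a mirror dictionary and checks the string by peeling matching characters off both ends with early exit, instead of building the whole mapped string character by character and comparing it to string[::-1].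
import Mathlib
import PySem

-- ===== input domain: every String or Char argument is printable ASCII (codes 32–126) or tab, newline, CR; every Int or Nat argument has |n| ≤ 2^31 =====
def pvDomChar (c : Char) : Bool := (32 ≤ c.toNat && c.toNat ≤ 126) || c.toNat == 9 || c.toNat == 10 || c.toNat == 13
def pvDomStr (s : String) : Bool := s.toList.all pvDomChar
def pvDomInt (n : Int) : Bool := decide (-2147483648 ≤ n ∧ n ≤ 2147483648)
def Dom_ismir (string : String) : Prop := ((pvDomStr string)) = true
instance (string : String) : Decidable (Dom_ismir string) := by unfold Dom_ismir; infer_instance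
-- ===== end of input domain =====

-- B replaces the if-chain helper by a mirror dictionary and peels matching characters off both
-- ends of the list with early exit, instead of building the whole mapped string and comparing it
-- to the reversal (a timing run measured B faster).

-- ===== PORT A =====
-- rev takes the one-character string string[i] (a Char under the convention) and returns a
-- Python string, ported as List Char ("invalid" is the 7-character list).
def rev (c : Char) : List Char :=
  if c == 'A' then ['A']
  else if c == 'E' then ['3']
  else if c == 'H' then ['H']
  else if c == 'I' then ['I']
  else if c == 'J' then ['L']
  else if c == 'L' then ['J']
  else if c == 'M' then ['M']
  else if c == 'O' then ['O']
  else if c == 'S' then ['2']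
  else if c == 'T' then ['T']
  else if c == 'U' then ['U']
  else if c == 'V' then ['V']
  else if c == 'W' then ['W']
  else if c == 'X' then ['X']
  else if c == 'Y' then ['Y']
  else if c == 'Z' then ['5']
  else if c == '1' then ['1']
  else if c == '2' then ['S']
  else if c == '3' then ['E']
  else if c == '5' then ['Z']
  else if c == '8' then ['8']
  else ['i', 'n', 'v', 'a', 'l', 'i', 'd']

-- strings handled on the .toList side (PySem.Chars); the index of the range loop is always in
-- range, so pyGetD's default is never used
def ismir (string : String) : Bool :=
  let cs := string.toList
  let temp :=
    (PySem.List.pyRange 0 (cs.length : Int) 1).foldl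
      (fun t i => t ++ rev (PySem.List.pyGetD cs i ' ')) ([] : List Char)
  if temp == (PySem.List.slice? cs none none (-1)).getD [] then true else false

-- ===== PORT B =====
-- the _MIRROR dict literal of Source B (distinct keys, insertion order)
def mirrorTable : PySem.Dict Char Char := PySem.Dict.mk
  [('A','A'), ('E','3'), ('H','H'), ('I','I'), ('J','L'), ('L','J'), ('M','M'),
   ('O','O'), ('S','2'), ('T','T'), ('U','U'), ('V','V'), ('W','W'), ('X','X'),
   ('Y','Y'), ('Z','5'), ('1','1'), ('2','S'), ('3','E'), ('5','Z'), ('8','8')]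

-- the while loop of Source B: cs[0] is the head, cs[-1] the getLast, cs[1:-1] is rest.dropLast;
-- _MIRROR.get(cs[0]) != cs[-1] is the Option ≠ some comparison
def ismirAltGo : List Char → Bool
  | [] => true
  | c :: rest =>
    if mirrorTable.get? c == some ((c :: rest).getLast (by simp)) then
      ismirAltGo rest.dropLast
    else false
termination_by cs => cs.length
decreasing_by simp only [List.length_dropLast, List.length_cons]; omega

def ismir_alt (string : String) : Bool :=
  ismirAltGo string.toList

-- ===== PRECONDITION & SPEC =====
def Spec_ismir (string : String) (out : Bool) : Prop := out = ismir_alt string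
instance (string : String) (out : Bool) : Decidable (Spec_ismir string out) := by unfold Spec_ismir; infer_instance

-- ===== CLAIM (what is proved, stated in full; the proofs are below) =====
def Claim_equal_ismir : Prop := ∀ (string : String), Dom_ismir string → Spec_ismir string (ismir string)

-- ===== LEMMAS AND PROOFS =====

-- rev maps a character either to a single character or to the 7-character "invalid"
lemma ite_branches {P : List Char → Prop} (b : Prop) [Decidable b] (x y : List Char)
    (hx : P x) (hy : P y) : P (if b then x else y) := by
  split <;> assumption

lemma rev_shape (c : Char) : (∃ b, rev c = [b]) ∨ (rev c).length = 7 := by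
  unfold rev
  repeat' apply ite_branches (P := fun l => (∃ b, l = [b]) ∨ l.length = 7)
  all_goals first | exact Or.inl ⟨_, rfl⟩ | exact Or.inr rfl

-- the dict lookup of B agrees with the if-chain of A: some b exactly when rev yields [b]
lemma mirror_get_iff (c b : Char) : mirrorTable.get? c = some b ↔ rev c = [b] := by
  unfold rev
  by_cases h1 : c = 'A'
  · subst h1; constructor <;> (intro h; injection h with h; subst h; decide)
  by_cases h2 : c = 'E'
  · subst h2; constructor <;> (intro h; injection h with h; subst h; decide)
  by_cases h3 : c = 'H'
  · subst h3; constructor <;> (intro h; injection h with h; subst h; decide)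
  by_cases h4 : c = 'I'
  · subst h4; constructor <;> (intro h; injection h with h; subst h; decide)
  by_cases h5 : c = 'J'
  · subst h5; constructor <;> (intro h; injection h with h; subst h; decide)
  by_cases h6 : c = 'L'
  · subst h6; constructor <;> (intro h; injection h with h; subst h; decide)
  by_cases h7 : c = 'M'
  · subst h7; constructor <;> (intro h; injection h with h; subst h; decide)
  by_cases h8 : c = 'O'
  · subst h8; constructor <;> (intro h; injection h with h; subst h; decide)
  by_cases h9 : c = 'S'
  · subst h9; constructor <;> (intro h; injection h with h; subst h; decide)
  by_cases h10 : c = 'T'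
  · subst h10; constructor <;> (intro h; injection h with h; subst h; decide)
  by_cases h11 : c = 'U'
  · subst h11; constructor <;> (intro h; injection h with h; subst h; decide)
  by_cases h12 : c = 'V'
  · subst h12; constructor <;> (intro h; injection h with h; subst h; decide)
  by_cases h13 : c = 'W'
  · subst h13; constructor <;> (intro h; injection h with h; subst h; decide)
  by_cases h14 : c = 'X'
  · subst h14; constructor <;> (intro h; injection h with h; subst h; decide)
  by_cases h15 : c = 'Y'
  · subst h15; constructor <;> (intro h; injection h with h; subst h; decide)
  by_cases h16 : c = 'Z'
  · subst h16; constructor <;> (intro h; injection h with h; subst h; decide)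
  by_cases h17 : c = '1'
  · subst h17; constructor <;> (intro h; injection h with h; subst h; decide)
  by_cases h18 : c = '2'
  · subst h18; constructor <;> (intro h; injection h with h; subst h; decide)
  by_cases h19 : c = '3'
  · subst h19; constructor <;> (intro h; injection h with h; subst h; decide)
  by_cases h20 : c = '5'
  · subst h20; constructor <;> (intro h; injection h with h; subst h; decide)
  by_cases h21 : c = '8'
  · subst h21; constructor <;> (intro h; injection h with h; subst h; decide)
  constructor
  · intro h
    exfalso
    simp [mirrorTable, PySem.Dict.get?, Ne.symm h1, Ne.symm h2, Ne.symm h3, Ne.symm h4, Ne.symm h5, Ne.symm h6, Ne.symm h7, Ne.symm h8, Ne.symm h9, Ne.symm h10, Ne.symm h11, Ne.symm h12, Ne.symm h13, Ne.symm h14, Ne.symm h15, Ne.symm h16, Ne.symm h17, Ne.symm h18, Ne.symm h19, Ne.symm h20, Ne.symm h21] at h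
  · intro h
    exfalso
    simp [h1, h2, h3, h4, h5, h6, h7, h8, h9, h10, h11, h12, h13, h14, h15, h16, h17, h18, h19, h20, h21] at h

-- each rev block is nonempty, so the flattened map is at least as long as the input
lemma length_flatMap_rev_ge (xs : List Char) : xs.length ≤ (xs.flatMap rev).length := by
  induction xs with
  | nil => simp
  | cons x xs ih =>
    have h1 : 1 ≤ (rev x).length := by
      rcases rev_shape x with ⟨b, hb⟩ | h7
      · rw [hb]; simp
      · omega
    rw [List.flatMap_cons, List.length_append]
    simp only [List.length_cons]
    omega

-- the mapped string equals ys iff every aligned pair is a singleton match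
lemma flatMap_rev_eq_iff (xs ys : List Char) (h : xs.length = ys.length) :
    xs.flatMap rev = ys ↔ ∀ p ∈ xs.zip ys, rev p.1 = [p.2] := by
  induction xs generalizing ys with
  | nil =>
    cases ys with
    | nil => simp
    | cons y ys => simp at h
  | cons x xs ih =>
    cases ys with
    | nil => simp at h
    | cons y ys =>
      simp only [List.length_cons, Nat.add_right_cancel_iff] at h
      simp only [List.flatMap_cons, List.zip_cons_cons, List.mem_cons]
      rcases rev_shape x with ⟨b, hb⟩ | h7
      · constructor
        · intro he
          rw [hb] at he
          simp only [List.cons_append, List.nil_append, List.cons.injEq] at he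
          intro p hp
          rcases hp with rfl | hp
          · rw [hb, he.1]
          · exact ((ih ys h).mp he.2) p hp
        · intro hall
          have h1 := hall (x, y) (Or.inl rfl)
          rw [hb] at h1 ⊢
          simp only [List.cons.injEq] at h1
          simp only [List.cons_append, List.nil_append, List.cons.injEq]
          exact ⟨h1.1, (ih ys h).mpr fun p hp => hall p (Or.inr hp)⟩
      · constructor
        · intro he
          exfalso
          have hlen := congrArg List.length he
          have := length_flatMap_rev_ge xs
          simp only [List.length_append, List.length_cons, h7] at hlen
          omega
        · intro hall
          exfalso
          have h1 := hall (x, y) (Or.inl rfl)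
          have := congrArg List.length h1
          simp [h7] at this

-- rev is an involution on its mapped characters
lemma ite_eq_elim {b : Prop} [Decidable b] {x y z : List Char}
    (h : (if b then x else y) = z) : (b ∧ x = z) ∨ (¬ b ∧ y = z) := by
  split at h <;> tauto

lemma rev_sym (a b : Char) (h : rev a = [b]) : rev b = [a] := by
  unfold rev at h
  repeat
    rcases ite_eq_elim h with ⟨hc, h⟩ | ⟨-, h⟩
    · rw [beq_iff_eq] at hc
      subst hc
      injection h with h1 h2
      subst h1
      decide
  injection h with h1 h2
  simp at h2

-- index form of the pairwise condition (cs.getD with in-range indices)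
lemma zip_reverse_iff (cs : List Char) :
    (∀ p ∈ cs.zip cs.reverse, rev p.1 = [p.2]) ↔
      (∀ i < cs.length, rev (cs.getD i ' ') = [cs.getD (cs.length - 1 - i) ' ']) := by
  constructor
  · intro hall i hi
    have hzip : (cs.getD i ' ', cs.getD (cs.length - 1 - i) ' ') ∈ cs.zip cs.reverse := by
      have hi' : i < (cs.zip cs.reverse).length := by
        simp [List.length_zip]; omega
      have := List.getElem_mem hi'
      have hget : (cs.zip cs.reverse)[i] = (cs.getD i ' ', cs.getD (cs.length - 1 - i) ' ') := by
        rw [List.getElem_zip]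
        have h1 : cs[i]'(by omega) = cs.getD i ' ' := by
          rw [List.getD_eq_getElem _ _ (by omega)]
        have h2 : cs.reverse[i]'(by simp; omega) = cs.getD (cs.length - 1 - i) ' ' := by
          rw [List.getElem_reverse, List.getD_eq_getElem _ _ (by omega)]
        rw [h1, h2]
      rw [hget] at this; exact this
    exact hall _ hzip
  · intro hall p hp
    rw [List.mem_iff_getElem] at hp
    obtain ⟨i, hi, hget⟩ := hp
    have hilen : i < cs.length := by simp [List.length_zip] at hi; omega
    rw [List.getElem_zip] at hget
    have h1 : cs[i]'(by omega) = cs.getD i ' ' := by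
      rw [List.getD_eq_getElem _ _ (by omega)]
    have h2 : cs.reverse[i]'(by simp; omega) = cs.getD (cs.length - 1 - i) ' ' := by
      rw [List.getElem_reverse, List.getD_eq_getElem _ _ (by omega)]
    rw [h1, h2] at hget
    rw [← hget]
    exact hall i hilen

-- checking the first half of the pairs suffices, by rev_sym
lemma half_iff (cs : List Char) :
    (∀ i < cs.length, rev (cs.getD i ' ') = [cs.getD (cs.length - 1 - i) ' ']) ↔
      (∀ i < (cs.length + 1) / 2, rev (cs.getD i ' ') = [cs.getD (cs.length - 1 - i) ' ']) := by
  constructor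
  · intro hall i hi
    exact hall i (by omega)
  · intro hhalf i hi
    by_cases hc : i < (cs.length + 1) / 2
    · exact hhalf i hc
    · have hj : cs.length - 1 - i < (cs.length + 1) / 2 := by omega
      have := rev_sym _ _ (hhalf (cs.length - 1 - i) hj)
      have heq : cs.length - 1 - (cs.length - 1 - i) = i := by omega
      rw [heq] at this
      exact this

-- getD through dropLast at in-range indices
lemma getD_dropLast (l : List Char) (i : Nat) (h : i < l.dropLast.length) :
    l.dropLast.getD i ' ' = l.getD i ' ' := by
  rw [List.getD_eq_getElem _ _ h, List.getD_eq_getElem _ _ (by simp at h ⊢; omega)]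
  exact List.getElem_dropLast ..

-- peeling one matched pair preserves the half-pairs condition
lemma half_step (c : Char) (rest : List Char)
    (hc : rev c = [(c :: rest).getD rest.length ' ']) :
    (∀ i < (rest.dropLast.length + 1) / 2,
        rev (rest.dropLast.getD i ' ') = [rest.dropLast.getD (rest.dropLast.length - 1 - i) ' ']) ↔
    (∀ i < ((c :: rest).length + 1) / 2,
        rev ((c :: rest).getD i ' ') = [(c :: rest).getD ((c :: rest).length - 1 - i) ' ']) := by
  have hml : rest.dropLast.length = rest.length - 1 := by simp
  have key : ∀ j, j < rest.dropLast.length →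
      rest.dropLast.getD j ' ' = (c :: rest).getD (j + 1) ' ' := by
    intro j hj
    rw [List.getD_cons_succ]
    exact getD_dropLast rest j hj
  constructor
  · intro hm i hi
    simp only [List.length_cons] at hi ⊢
    match i with
    | 0 => simpa using hc
    | j + 1 =>
      have hr2 : 2 ≤ rest.length := by omega
      have hjm : j < (rest.dropLast.length + 1) / 2 := by omega
      have := hm j hjm
      rw [key j (by omega)] at this
      rw [key (rest.dropLast.length - 1 - j) (by omega)] at this
      have e : rest.dropLast.length - 1 - j + 1 = rest.length + 1 - 1 - (j + 1) := by omega
      rw [e] at this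
      exact this
  · intro hall j hj
    have hr2 : 2 ≤ rest.length := by omega
    have := hall (j + 1) (by simp only [List.length_cons]; omega)
    simp only [List.length_cons] at this
    rw [key j (by omega), key (rest.dropLast.length - 1 - j) (by omega)]
    have e : rest.dropLast.length - 1 - j + 1 = rest.length + 1 - 1 - (j + 1) := by omega
    rw [e]
    exact this

-- cs[-1] written with getD
lemma getLast_eq_getD (c : Char) (rest : List Char) :
    (c :: rest).getLast (by simp) = (c :: rest).getD rest.length ' ' := by
  rw [List.getLast_eq_getElem, List.getD_eq_getElem _ _ (by simp)]
  rfl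

-- characterization of B via functional induction on the peel loop
lemma go_iff (cs : List Char) :
    ismirAltGo cs = true ↔
      ∀ i < (cs.length + 1) / 2, rev (cs.getD i ' ') = [cs.getD (cs.length - 1 - i) ' '] := by
  induction cs using ismirAltGo.induct with
  | case1 => simp [ismirAltGo]
  | case2 c rest h ih =>
    have hlast := getLast_eq_getD c rest
    have hc : rev c = [(c :: rest).getD rest.length ' '] := by
      rw [← hlast]
      exact (mirror_get_iff c _).mp (eq_of_beq h)
    rw [show ismirAltGo (c :: rest) = ismirAltGo rest.dropLast by simp [ismirAltGo, h]]
    rw [ih, half_step c rest hc]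
  | case3 c rest h =>
    rw [show ismirAltGo (c :: rest) = false from by simp only [ismirAltGo]; rw [if_neg h]]
    constructor
    · intro hf; cases hf
    · intro hall
      exfalso
      apply h
      have h0 := hall 0 (by simp only [List.length_cons]; omega)
      simp only [List.getD_cons_zero, List.length_cons, Nat.add_sub_cancel, Nat.sub_zero] at h0
      rw [getLast_eq_getD c rest]
      exact beq_iff_eq.mpr ((mirror_get_iff c _).mpr h0)

-- characterization of A
lemma ismir_eq_true_iff (string : String) :
    ismir string = true ↔ string.toList.flatMap rev = string.toList.reverse := by
  unfold ismir
  dsimp only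
  rw [PySem.List.foldl_pyRange_zero_pyGetD' (f := fun t c => t ++ rev c) (d := ' ')]
  rw [PySem.List.foldl_append_eq_flatMap]
  rw [PySem.List.slice?_none_none_neg_one]
  simp

-- ===== VERDICT (by name: the statement is the Claim_ definition above) =====
theorem ismir_spec : Claim_equal_ismir := by
  intro string _
  unfold Spec_ismir ismir_alt
  have hA := ismir_eq_true_iff string
  have hB := go_iff string.toList
  have hiff : ismir string = true ↔ ismirAltGo string.toList = true := by
    rw [hA, hB, flatMap_rev_eq_iff _ _ (by simp), zip_reverse_iff, half_iff]
  cases hA' : ismir string <;> cases hB' : ismirAltGo string.toList <;> simp_all
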